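-- pv_equiv track=rewrite | github.com/hermeschen1116/ncu-lesson | ALG_HW2_Task1.py | swapCount
-- ===== SOURCE A (Python) =====
-- def swapCount(_arr_, _q_) :
--     swapCnt = 0
--     for i in range(_q_) :
--         for j in range(i, _q_) :
--             if (_arr_[i] > _arr_[j]) :
--                 _arr_[i], _arr_[j] = _arr_[j], _arr_[i]
--                 swapCnt += 1
--     return swapCnt
-- ===== SOURCE B (Python) =====
-- def swapCount(_arr_, _q_):
--     seen = set()
--     total = 0
--     for x in _arr_[:max(_q_, 0)]:
--         for v in seen:
--             if v > x:
--                 total += 1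
--         seen.add(x)
--     return total
-- ===== Notes on version B (the rewrite author's own statement) =====
-- stated objective: alternative
-- what changed: Replaces the mutating double compare-and-swap loop by a single non-mutating pass that adds, for each element, the number of distinct larger values seen before it (an exact identity for this swap count).
import Mathlib
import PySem

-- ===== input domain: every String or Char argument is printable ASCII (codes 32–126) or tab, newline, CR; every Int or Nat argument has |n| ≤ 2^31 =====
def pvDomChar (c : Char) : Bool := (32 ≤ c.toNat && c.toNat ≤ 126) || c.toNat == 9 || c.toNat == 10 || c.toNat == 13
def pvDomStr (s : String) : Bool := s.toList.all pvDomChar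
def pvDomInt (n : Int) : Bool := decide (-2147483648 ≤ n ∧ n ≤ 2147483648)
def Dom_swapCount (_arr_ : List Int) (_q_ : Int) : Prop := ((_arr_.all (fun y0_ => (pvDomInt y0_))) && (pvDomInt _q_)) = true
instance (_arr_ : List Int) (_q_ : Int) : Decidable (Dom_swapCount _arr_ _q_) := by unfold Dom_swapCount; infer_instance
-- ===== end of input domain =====

-- B replaces A's in-place double compare-and-swap loop by one non-mutating pass that sums,
-- per element, the number of distinct larger values seen before it (same return value;
-- A mutates _arr_ in place, B does not — the equivalence proved here is about the return value only).

-- ===== PORT A =====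
-- one step of the inner loop body: 'if _arr_[i] > _arr_[j]: swap; swapCnt += 1'
def pvInnerStep (i : Int) (st : List Int × Int) (j : Int) : List Int × Int :=
  match PySem.List.pyGet? st.1 i, PySem.List.pyGet? st.1 j with
  | some a, some b => if a > b then ((st.1.set i.toNat b).set j.toNat a, st.2 + 1) else st
  | _, _ => st  -- Python raises IndexError here; excluded by Pre_swapCount

def swapCount (_arr_ : List Int) (_q_ : Int) : Int :=
  ((PySem.List.pyRange 0 _q_ 1).foldl
    (fun st i => (PySem.List.pyRange i _q_ 1).foldl (pvInnerStep i) st)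
    (_arr_, 0)).2

-- ===== PORT B =====
-- loop body: 'for v in seen: if v > x: total += 1' then 'seen.add(x)'
def pvBStep (st : PySem.Set Int × Int) (x : Int) : PySem.Set Int × Int :=
  (PySem.Set.add st.1 x, st.1.foldl (fun t v => if v > x then t + 1 else t) st.2)

def swapCount_alt (_arr_ : List Int) (_q_ : Int) : Int :=
  ((PySem.List.slice _arr_ none (some (max _q_ 0))).foldl pvBStep (PySem.Set.empty, 0)).2

-- ===== PRECONDITION & SPEC =====
-- Pre_ excludes exactly the inputs where A raises IndexError: _q_ larger than the list length.
def Pre_swapCount (_arr_ : List Int) (_q_ : Int) : Prop := _q_ ≤ (_arr_.length : Int)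
instance (_arr_ : List Int) (_q_ : Int) : Decidable (Pre_swapCount _arr_ _q_) := by unfold Pre_swapCount; infer_instance
def pvWitness_swapCount : List Int × Int := ([2, 0, 1], 3)


def Spec_swapCount (_arr_ : List Int) (_q_ : Int) (out : Int) : Prop := out = swapCount_alt _arr_ _q_
instance (_arr_ : List Int) (_q_ : Int) (out : Int) : Decidable (Spec_swapCount _arr_ _q_ out) := by unfold Spec_swapCount; infer_instance

-- ===== CLAIM (what is proved, stated in full; the proofs are below) =====
def Claim_equal_swapCount : Prop := ∀ (_arr_ : List Int) (_q_ : Int), Dom_swapCount _arr_ _q_ → Pre_swapCount _arr_ _q_ → Spec_swapCount _arr_ _q_ (swapCount _arr_ _q_)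

-- ===== LEMMAS AND PROOFS =====

-- One pass of A's inner loop over the segment after position i, as structural recursion:
-- passC c ys = (final value at position i, final segment contents, number of swaps).
def passC : Int → List Int → Int × List Int × Int
  | c, [] => (c, [], 0)
  | c, y :: ys =>
    if c > y then
      let p := passC y ys; (p.1, c :: p.2.1, p.2.2 + 1)
    else
      let p := passC c ys; (p.1, y :: p.2.1, p.2.2)

theorem passC_len (c : Int) (ys : List Int) : (passC c ys).2.1.length = ys.length := by
  induction ys generalizing c with
  | nil => rfl
  | cons y ys ih => by_cases h : c > y <;> simp [passC, h, ih]

-- A's whole algorithm on the first-q segment, pass by pass.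
def asim : List Int → Int
  | [] => 0
  | x :: xs => (passC x xs).2.2 + asim (passC x xs).2.1
termination_by l => l.length
decreasing_by simp [passC_len]

-- B's counting formula with an explicit seen-set accumulator.
def fcount (T : List Int) : List Int → Int
  | [] => 0
  | y :: ys => (T.countP (fun v => decide (v > y)) : Int) + fcount (PySem.Set.add T y) ys

theorem bfold_eq_fcount (l : List Int) : ∀ (T : PySem.Set Int) (t : Int),
    (l.foldl pvBStep (T, t)).2 = t + fcount T l := by
  induction l with
  | nil => intro T t; simp [fcount]
  | cons y ys ih =>
    intro T t
    simp only [List.foldl_cons, pvBStep, ih, PySem.List.foldl_ite_add_one, fcount]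
    ring

theorem perm_of_mem_insert {T U : List Int} {c : Int} (hT : T.Nodup) (hU : U.Nodup)
    (hmem : ∀ v, v ∈ T ↔ v ∈ U ∨ v = c) :
    T.Perm (if c ∈ U then U else c :: U) := by
  split_ifs with hc
  · exact (List.perm_ext_iff_of_nodup hT hU).mpr (fun v => by
      rw [hmem]
      constructor
      · rintro (h | rfl) <;> [exact h; exact hc]
      · exact Or.inl)
  · exact (List.perm_ext_iff_of_nodup hT (List.nodup_cons.mpr ⟨hc, hU⟩)).mpr (fun v => by
      rw [hmem, List.mem_cons]; tauto)

theorem countP_all_of_min {U : List Int} {c y : Int} (hmin : ∀ u ∈ U, c ≤ u) (hcy : y < c) :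
    U.countP (fun v => decide (v > y)) = U.length :=
  List.countP_eq_length.mpr (fun u hu => by simpa using lt_of_lt_of_le hcy (hmin u hu))

theorem count_eq_of_swap {T U : List Int} {c y : Int} (hT : T.Nodup) (hU : U.Nodup)
    (hmem : ∀ v, v ∈ T ↔ v ∈ U ∨ v = c) (hmin : ∀ u ∈ U, c ≤ u) (hcy : c > y) :
    (T.countP (fun v => decide (v > y)) : Int) = 1 + (U.countP (fun v => decide (v > c)) : Int) := by
  have hperm := perm_of_mem_insert hT hU hmem
  have hTc := hperm.countP_eq (p := fun v => decide (v > y))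
  -- U.countP (· > c) + (occurrences of c in U) = U.length
  have hsplit : U.countP (fun v => decide (v > c)) + U.countP (fun v => decide (v ≤ c)) = U.length := by
    simpa using (List.length_eq_countP_add_countP (l := U) (p := fun v => decide (v > c))).symm
  have hle : U.countP (fun v => decide (v ≤ c)) = U.count c := by
    rw [List.count_eq_countP]
    refine List.countP_congr (fun u hu => ?_)
    have hcu := hmin u hu
    simp only [decide_eq_true_eq, beq_iff_eq]
    omega
  by_cases hc : c ∈ U
  · have hcnt : U.count c = 1 := List.count_eq_one_of_mem hU hc
    rw [if_pos hc] at hTc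
    rw [hTc, countP_all_of_min hmin hcy]
    omega
  · have hcnt : U.count c = 0 := List.count_eq_zero.mpr hc
    rw [if_neg hc] at hTc
    rw [hTc, List.countP_cons, countP_all_of_min hmin hcy, if_pos (by simpa using hcy)]
    omega

theorem count_eq_of_noswap {T U : List Int} {c y : Int} (hT : T.Nodup) (hU : U.Nodup)
    (hmem : ∀ v, v ∈ T ↔ v ∈ U ∨ v = c) (hcy : ¬ c > y) :
    (T.countP (fun v => decide (v > y)) : Int) = (U.countP (fun v => decide (v > y)) : Int) := by
  have hperm := perm_of_mem_insert hT hU hmem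
  have hTc := hperm.countP_eq (p := fun v => decide (v > y))
  by_cases hc : c ∈ U
  · rw [if_pos hc] at hTc
    rw [hTc]
  · rw [if_neg hc] at hTc
    rw [hTc, List.countP_cons, if_neg (by simpa using hcy)]
    omega

-- Core identity: one pass of A (carry c) preserves the distinct-larger-left count.
theorem fcount_pass (ys : List Int) : ∀ (c : Int) (T U : List Int), T.Nodup → U.Nodup →
    (∀ v, v ∈ T ↔ v ∈ U ∨ v = c) → (∀ u ∈ U, c ≤ u) →
    fcount T ys = (passC c ys).2.2 + fcount U (passC c ys).2.1 := by
  induction ys with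
  | nil => intro c T U _ _ _ _; simp [fcount, passC]
  | cons y ys ih =>
    intro c T U hT hU hmem hmin
    by_cases hcy : c > y
    · have hp : passC c (y :: ys) =
          ((passC y ys).1, c :: (passC y ys).2.1, (passC y ys).2.2 + 1) := by
        simp [passC, hcy]
      have hih := ih y (PySem.Set.add T y) (PySem.Set.add U c)
        (PySem.Set.nodup_add _ _ hT) (PySem.Set.nodup_add _ _ hU)
        (fun v => by
          simp only [PySem.Set.mem_add, hmem]; try tauto)
        (fun u hu => by
          rcases (PySem.Set.mem_add _ _ _).mp hu with h | rfl
          · exact le_of_lt (lt_of_lt_of_le hcy (hmin u h))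
          · exact le_of_lt hcy)
      rw [hp]
      simp only [fcount]
      rw [hih, count_eq_of_swap hT hU hmem hmin hcy]
      ring
    · have hp : passC c (y :: ys) =
          ((passC c ys).1, y :: (passC c ys).2.1, (passC c ys).2.2) := by
        simp [passC, hcy]
      have hih := ih c (PySem.Set.add T y) (PySem.Set.add U y)
        (PySem.Set.nodup_add _ _ hT) (PySem.Set.nodup_add _ _ hU)
        (fun v => by
          simp only [PySem.Set.mem_add, hmem]; try tauto)
        (fun u hu => by
          rcases (PySem.Set.mem_add _ _ _).mp hu with h | rfl
          · exact hmin u h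
          · omega)
      rw [hp]
      simp only [fcount]
      rw [hih, count_eq_of_noswap hT hU hmem hcy]
      ring

theorem asim_eq_fcount : ∀ (l : List Int), asim l = fcount [] l
  | [] => by simp [asim, fcount]
  | x :: xs => by
    have ih := asim_eq_fcount (passC x xs).2.1
    have hpass := fcount_pass xs x [x] [] (by simp) (by simp)
      (fun v => by simp) (by simp)
    have hadd : PySem.Set.add ([] : PySem.Set Int) x = [x] := rfl
    simp only [asim, fcount, ih, hadd, List.countP_nil]
    rw [hpass]
    ring
termination_by l => l.length
decreasing_by simp [passC_len]

-- ===== index-level simulation of A =====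

theorem pvInnerStep_self (P Z : List Int) (x : Int) (cnt : Int) :
    pvInnerStep (P.length : Int) (P ++ x :: Z, cnt) (P.length : Int) = (P ++ x :: Z, cnt) := by
  simp [pvInnerStep]

theorem inner_eq (rest : List Int) : ∀ (M : List Int) (c cnt : Int) (P tail : List Int),
    (PySem.List.pyRange ((P.length : Int) + 1 + (M.length : Int))
        ((P.length : Int) + 1 + (M.length : Int) + (rest.length : Int)) 1).foldl
      (pvInnerStep (P.length : Int)) (P ++ c :: M ++ rest ++ tail, cnt)
    = (P ++ (passC c rest).1 :: M ++ (passC c rest).2.1 ++ tail, cnt + (passC c rest).2.2) := by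
  induction rest with
  | nil =>
    intro M c cnt P tail
    rw [PySem.List.pyRange_one_eq_nil (by simp)]
    simp [passC]
  | cons y ys ih =>
    intro M c cnt P tail
    have hlt : (P.length : Int) + 1 + (M.length : Int) <
        (P.length : Int) + 1 + (M.length : Int) + ((y :: ys).length : Int) := by
      simp only [List.length_cons]; push_cast; omega
    rw [PySem.List.pyRange_one_cons hlt, List.foldl_cons]
    simp only [List.append_assoc, List.cons_append, List.singleton_append, List.nil_append]
    have hgi : PySem.List.pyGet? (P ++ c :: (M ++ (y :: (ys ++ tail)))) ((P.length : Int)) = some c :=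
      PySem.List.pyGet?_append_length (pre := P) (y := c) (ys := M ++ (y :: (ys ++ tail)))
    have hgj : PySem.List.pyGet? (P ++ c :: (M ++ (y :: (ys ++ tail))))
        ((P.length : Int) + 1 + (M.length : Int)) = some y := by
      rw [show P ++ c :: (M ++ (y :: (ys ++ tail))) = (P ++ c :: M) ++ (y :: (ys ++ tail)) by simp,
        show (P.length : Int) + 1 + (M.length : Int) = (((P ++ c :: M).length : Nat) : Int) by
          simp only [List.length_append, List.length_cons]; push_cast; ring]
      exact PySem.List.pyGet?_append_length (pre := P ++ c :: M) (y := y) (ys := ys ++ tail)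
    by_cases hcy : c > y
    · have h1 : (P ++ c :: (M ++ (y :: (ys ++ tail)))).set ((P.length : Int)).toNat y
          = P ++ y :: (M ++ (y :: (ys ++ tail))) := by
        rw [Int.toNat_natCast, List.set_append_right (s := P) _ _ (le_refl _)]
        simp
      have h2 : (P ++ y :: (M ++ (y :: (ys ++ tail)))).set ((P.length : Int) + 1 + (M.length : Int)).toNat c
          = P ++ y :: (M ++ (c :: (ys ++ tail))) := by
        rw [show P ++ y :: (M ++ (y :: (ys ++ tail))) = (P ++ y :: M) ++ (y :: (ys ++ tail)) by simp,
          show ((P.length : Int) + 1 + (M.length : Int)).toNat = (P ++ y :: M).length by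
            simp only [List.length_append, List.length_cons]; omega,
          List.set_append_right _ _ (le_refl _)]
        simp
      have hstep : pvInnerStep (P.length : Int) (P ++ c :: (M ++ (y :: (ys ++ tail))), cnt)
          ((P.length : Int) + 1 + (M.length : Int))
          = (P ++ y :: (M ++ (c :: (ys ++ tail))), cnt + 1) := by
        simp only [pvInnerStep, hgi, hgj, if_pos hcy, h1, h2]
      rw [hstep]
      have ih' := ih (M ++ [c]) y (cnt + 1) P tail
      simp only [List.append_assoc, List.cons_append, List.singleton_append, List.nil_append,
        List.length_append, List.length_cons, List.length_nil] at ih'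
      push_cast at ih'
      simp only [List.length_cons]
      push_cast
      rw [show (P.length : Int) + 1 + (M.length : Int) + ((ys.length : Int) + 1)
          = (P.length : Int) + 1 + ((M.length : Int) + 1) + (ys.length : Int) by ring,
        show (P.length : Int) + 1 + (M.length : Int) + 1
          = (P.length : Int) + 1 + ((M.length : Int) + 1) by ring]
      rw [ih']
      have hp : passC c (y :: ys) =
          ((passC y ys).1, c :: (passC y ys).2.1, (passC y ys).2.2 + 1) := by
        simp [passC, hcy]
      rw [hp]
      simp only [List.append_assoc, List.cons_append, List.singleton_append, List.nil_append]
      exact Prod.ext rfl (by ring)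
    · have hstep : pvInnerStep (P.length : Int) (P ++ c :: (M ++ (y :: (ys ++ tail))), cnt)
          ((P.length : Int) + 1 + (M.length : Int))
          = (P ++ c :: (M ++ (y :: (ys ++ tail))), cnt) := by
        simp only [pvInnerStep, hgi, hgj, if_neg hcy]
      rw [hstep]
      have ih' := ih (M ++ [y]) c cnt P tail
      simp only [List.append_assoc, List.cons_append, List.singleton_append, List.nil_append,
        List.length_append, List.length_cons, List.length_nil] at ih'
      push_cast at ih'
      simp only [List.length_cons]
      push_cast
      rw [show (P.length : Int) + 1 + (M.length : Int) + ((ys.length : Int) + 1)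
          = (P.length : Int) + 1 + ((M.length : Int) + 1) + (ys.length : Int) by ring,
        show (P.length : Int) + 1 + (M.length : Int) + 1
          = (P.length : Int) + 1 + ((M.length : Int) + 1) by ring]
      rw [ih']
      have hp : passC c (y :: ys) =
          ((passC c ys).1, y :: (passC c ys).2.1, (passC c ys).2.2) := by
        simp [passC, hcy]
      rw [hp]
      simp

theorem outer_eq (n : Nat) : ∀ (body P tail : List Int) (cnt : Int), body.length = n →
    ((PySem.List.pyRange (P.length : Int) ((P.length + n : Nat) : Int) 1).foldl
      (fun st i => (PySem.List.pyRange i ((P.length + n : Nat) : Int) 1).foldl (pvInnerStep i) st)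
      (P ++ body ++ tail, cnt)).2 = cnt + asim body := by
  induction n with
  | zero =>
    intro body P tail cnt hb
    have hnil : body = [] := List.eq_nil_of_length_eq_zero hb
    subst hnil
    rw [PySem.List.pyRange_one_eq_nil (by simp)]
    simp [asim]
  | succ n ihn =>
    intro body P tail cnt hb
    cases body with
    | nil => simp at hb
    | cons x xs =>
      have hxs : xs.length = n := by simpa using hb
      have hlt : (P.length : Int) < ((P.length + (n + 1) : Nat) : Int) := by push_cast; omega
      rw [PySem.List.pyRange_one_cons hlt]
      simp only [List.foldl_cons, List.append_assoc, List.cons_append, List.nil_append]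
      rw [PySem.List.pyRange_one_cons hlt]
      simp only [List.foldl_cons]
      rw [pvInnerStep_self P (xs ++ tail) x cnt]
      have hin := inner_eq xs [] x cnt P tail
      simp only [List.append_assoc, List.cons_append, List.singleton_append, List.nil_append,
        List.length_nil, Nat.cast_zero, add_zero, hxs] at hin
      rw [show ((P.length + (n + 1) : Nat) : Int) = (P.length : Int) + 1 + (n : Int) by push_cast; ring,
        hin]
      have hout := ihn (passC x xs).2.1 (P ++ [(passC x xs).1]) tail (cnt + (passC x xs).2.2)
        (by rw [passC_len, hxs])
      simp only [List.append_assoc, List.cons_append, List.singleton_append, List.nil_append,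
        List.length_append, List.length_cons, List.length_nil] at hout
      push_cast at hout
      rw [hout, show asim (x :: xs) = (passC x xs).2.2 + asim (passC x xs).2.1 from by
        simp [asim]]
      ring

theorem swapCount_eq_asim (arr : List Int) (q : Int) (h0 : 0 ≤ q) (hlen : q ≤ (arr.length : Int)) :
    swapCount arr q = asim (arr.take q.toNat) := by
  have htake : (arr.take q.toNat).length = q.toNat := by
    rw [List.length_take]; omega
  have hout := outer_eq q.toNat (arr.take q.toNat) [] (arr.drop q.toNat) 0 htake
  simp only [List.length_nil, Nat.cast_zero, Nat.zero_add, List.nil_append,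
    List.take_append_drop, zero_add] at hout
  unfold swapCount
  rw [show q = ((q.toNat : Nat) : Int) from (Int.toNat_of_nonneg h0).symm]
  rw [show ((0 : Int)) = ((0 : Nat) : Int) from rfl] at hout ⊢
  exact hout

-- ===== VERDICT (by name: the statement is the Claim_ definition above) =====
theorem swapCount_spec : Claim_equal_swapCount := by
  intro arr q _ hpre
  unfold Spec_swapCount swapCount_alt
  by_cases h0 : 0 ≤ q
  · rw [swapCount_eq_asim arr q h0 hpre, asim_eq_fcount]
    rw [show max q 0 = q from max_eq_left h0, PySem.List.slice_to arr h0, bfold_eq_fcount]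
    simp
  · unfold swapCount
    rw [PySem.List.pyRange_one_eq_nil (by omega)]
    rw [show max q 0 = 0 from max_eq_right (by omega), PySem.List.slice_to arr (le_refl (0:Int)),
      bfold_eq_fcount]
    simp [fcount]
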